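-- pv_equiv track=rewrite | github.com/PaulRychkov/tensor-talks-agentic-ai-course | src/backend/interview-builder-service/src/services/interview_builder_service.py | _pick_finest_subtopic
-- ===== SOURCE A (Python) =====
-- from typing import Any, Dict, List, Optional, Tuple
--
-- def _pick_finest_subtopic(resolved: List[str]) -> Optional[str]:
--     """Pick the most specific subtopic tag (prefers theory_*/practice_*)
--     over coarse top-level topic tags like 'llm'/'nlp'/'machine_learning'."""
--     if not resolved:
--         return None
--     for t in resolved:
--         if t.startswith("theory_") or t.startswith("practice_"):
--             return t
--     coarse = {"llm", "nlp", "cv", "ml", "machine_learning", "deep_learning",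
--               "neural_networks", "data_science"}
--     for t in resolved:
--         if t not in coarse:
--             return t
--     return resolved[0]
-- ===== SOURCE B (Python) =====
-- def _pick_finest_subtopic(resolved):
--     """Single pass: return the first theory_/practice_ tag immediately,
--     remembering the first non-coarse tag as a pending fallback."""
--     if not resolved:
--         return None
--     coarse = {"llm", "nlp", "cv", "ml", "machine_learning", "deep_learning",
--               "neural_networks", "data_science"}
--     first_noncoarse = None
--     for t in resolved:
--         if t.startswith("theory_") or t.startswith("practice_"):
--             return t
--         if first_noncoarse is None and t not in coarse:
--             first_noncoarse = t
--     return first_noncoarse if first_noncoarse is not None else resolved[0]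
-- ===== Notes on version B (the rewrite author's own statement) =====
-- stated objective: simpler
-- what changed: Replaces A's two separate scans (one for fine theory_/practice_ tags, one for non-coarse tags) with a single pass that returns a fine tag immediately and carries the first non-coarse tag as a pending fallback.
import Mathlib
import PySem

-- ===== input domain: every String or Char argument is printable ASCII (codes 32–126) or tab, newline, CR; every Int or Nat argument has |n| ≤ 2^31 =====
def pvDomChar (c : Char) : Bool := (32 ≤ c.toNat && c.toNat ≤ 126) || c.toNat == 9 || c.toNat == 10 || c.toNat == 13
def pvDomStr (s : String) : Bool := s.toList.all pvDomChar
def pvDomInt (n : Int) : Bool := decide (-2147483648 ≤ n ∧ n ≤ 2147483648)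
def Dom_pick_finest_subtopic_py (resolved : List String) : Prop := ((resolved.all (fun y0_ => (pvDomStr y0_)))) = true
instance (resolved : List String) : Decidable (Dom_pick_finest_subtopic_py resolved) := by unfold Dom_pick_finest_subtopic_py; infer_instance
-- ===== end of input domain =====

-- B replaces A's two scans with one pass carrying a pending non-coarse fallback (simpler).


-- ===== PORT A =====
def pvCoarse : List String := ["llm", "nlp", "cv", "ml", "machine_learning", "deep_learning",
  "neural_networks", "data_science"]

def pvIsFine (t : String) : Bool :=
  PySem.Str.startswith t "theory_" || PySem.Str.startswith t "practice_"

-- A's first loop: return the first theory_/practice_ tag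
def pvFindFine : List String → Option String
  | [] => none
  | t :: ts => if pvIsFine t then some t else pvFindFine ts

-- A's second loop: return the first tag not in the coarse set
def pvFindNonCoarse : List String → Option String
  | [] => none
  | t :: ts => if pvCoarse.contains t then pvFindNonCoarse ts else some t

def pick_finest_subtopic_py (resolved : List String) : Option String :=
  match resolved with
  | [] => none
  | h :: _ =>
    match pvFindFine resolved with
    | some t => some t
    | none =>
      match pvFindNonCoarse resolved with
      | some t => some t
      | none => some h      -- resolved[0]; resolved is nonempty here

-- ===== PORT B =====
-- one pass: early-return on a fine tag, carry the first non-coarse tag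
def pvScan (fallback : String) : List String → Option String → Option String
  | [], fnc =>
    match fnc with
    | some x => some x
    | none => some fallback
  | t :: ts, fnc =>
    if pvIsFine t then some t
    else pvScan fallback ts
      (if fnc = none ∧ ¬ pvCoarse.contains t then some t else fnc)

def pick_finest_subtopic_py_alt (resolved : List String) : Option String :=
  match resolved with
  | [] => none
  | h :: _ => pvScan h resolved none

-- ===== PRECONDITION & SPEC =====
def Spec_pick_finest_subtopic_py (resolved : List String) (out : Option String) : Prop := out = pick_finest_subtopic_py_alt resolved
instance (resolved : List String) (out : Option String) : Decidable (Spec_pick_finest_subtopic_py resolved out) := by unfold Spec_pick_finest_subtopic_py; infer_instance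

-- ===== CLAIM (what is proved, stated in full; the proofs are below) =====
def Claim_equal_pick_finest_subtopic_py : Prop := ∀ (resolved : List String), Dom_pick_finest_subtopic_py resolved → Spec_pick_finest_subtopic_py resolved (pick_finest_subtopic_py resolved)

-- ===== LEMMAS AND PROOFS =====
lemma pvScan_eq (ts : List String) : ∀ (fallback : String) (fnc : Option String),
    pvScan fallback ts fnc =
      match pvFindFine ts with
      | some t => some t
      | none =>
        match fnc with
        | some x => some x
        | none =>
          match pvFindNonCoarse ts with
          | some t => some t
          | none => some fallback := by
  induction ts with
  | nil => intro fallback fnc; cases fnc <;> simp [pvScan, pvFindFine, pvFindNonCoarse]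
  | cons t ts ih =>
    intro fallback fnc
    by_cases hf : pvIsFine t
    · simp [pvScan, pvFindFine, hf]
    · cases fnc with
      | some x =>
        simp [pvScan, pvFindFine, hf, ih]
      | none =>
        by_cases hc : t ∈ pvCoarse <;>
          simp [pvScan, pvFindFine, pvFindNonCoarse, hf, hc, ih]

-- ===== VERDICT (by name: the statement is the Claim_ definition above) =====
theorem pick_finest_subtopic_py_spec : Claim_equal_pick_finest_subtopic_py := by
  intro resolved _
  unfold Spec_pick_finest_subtopic_py pick_finest_subtopic_py pick_finest_subtopic_py_alt
  cases resolved with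
  | nil => rfl
  | cons h ts =>
    simp only [pvScan_eq]
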